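-- pv_equiv track=rewrite | github.com/TiscoDisco/Python-codes | Bubble Sort.py | order_change
-- ===== SOURCE A (Python) =====
-- def order_change(lst, numVal, space, count):
--     if count == numVal:
--         return lst
--     else:
--         if lst[count] < lst[count+1]:
--             space = lst[count]
--             lst[count] = lst[count+1]
--             lst[count+1] = space
--             return order_change(lst, numVal, space, count+1)
--         else:
--             return order_change(lst, numVal, space, count+1)
-- ===== SOURCE B (Python) =====
-- def order_change(lst, numVal, space, count):
--     # One descending bubble pass over lst[count..numVal], computed functionally:
--     # scan carrying the running minimum; each position gets max(carry, next).
--     # (Unlike A, this does not mutate lst in place; return value is the same.)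
--     if count == numVal:
--         return lst
--     return lst[:count] + _bubble(lst[count], lst, count + 1, numVal) + lst[numVal + 1:]
--
--
-- def _bubble(carry, lst, i, numVal):
--     if i == numVal + 1:
--         return [carry]
--     x = lst[i]
--     return [max(carry, x)] + _bubble(min(carry, x), lst, i + 1, numVal)
-- ===== Notes on version B (the rewrite author's own statement) =====
-- stated objective: alternative
-- what changed: Replaces A's in-place recursive swap pass by a functional one-pass scan that carries the running minimum and emits max(carry, next) at each position, rebuilding the list from slices (no mutation of lst).
-- outside the precondition, e.g. on order_change([3, 1], 1, 0, -1): A returns [3, 1], B returns [3, 3, 1, 1]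
import Mathlib
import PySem

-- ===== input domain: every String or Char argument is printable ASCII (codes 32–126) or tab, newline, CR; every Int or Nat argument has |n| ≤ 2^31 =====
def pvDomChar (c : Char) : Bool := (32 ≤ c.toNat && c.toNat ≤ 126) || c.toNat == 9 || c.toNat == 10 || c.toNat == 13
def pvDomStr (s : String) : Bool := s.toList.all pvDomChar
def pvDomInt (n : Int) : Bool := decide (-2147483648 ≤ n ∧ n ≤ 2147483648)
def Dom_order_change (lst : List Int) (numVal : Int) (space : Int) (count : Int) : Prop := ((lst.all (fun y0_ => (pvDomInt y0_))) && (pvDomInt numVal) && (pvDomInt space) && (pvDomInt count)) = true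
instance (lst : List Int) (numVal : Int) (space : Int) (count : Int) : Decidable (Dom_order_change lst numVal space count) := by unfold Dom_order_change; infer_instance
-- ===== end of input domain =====

-- B replaces A's in-place recursive swap pass by a functional scan carrying the running
-- minimum (alternative decomposition; A mutates lst in place, B does not — the claim is
-- about the return value only).

-- ===== PORT A =====
-- fuel-bounded transliteration of A's recursion; none = IndexError / no return (excluded by Pre_)
def order_change_go : Nat → List Int → Int → Int → Int → Option (List Int)
  | 0, _, _, _, _ => none
  | f + 1, lst, numVal, space, count =>
    if count = numVal then some lst
    else
      match PySem.List.pyGet? lst count, PySem.List.pyGet? lst (count + 1) with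
      | some a, some b =>
        if a < b then
          -- space = lst[count]; lst[count] = lst[count+1]; lst[count+1] = space
          order_change_go f (PySem.List.pySetD (PySem.List.pySetD lst count b) (count + 1) a) numVal a (count + 1)
        else
          order_change_go f lst numVal space (count + 1)
      | _, _ => none

def order_change (lst : List Int) (numVal : Int) (space : Int) (count : Int) : List Int :=
  (order_change_go ((numVal - count).natAbs + 1) lst numVal space count).getD lst

-- ===== PORT B =====
-- fuel-bounded transliteration of B's _bubble recursion; none = IndexError / no return (excluded by Pre_)
def order_change_bubble : Nat → Int → List Int → Int → Int → Option (List Int)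
  | 0, _, _, _, _ => none
  | f + 1, carry, lst, i, numVal =>
    if i = numVal + 1 then some [carry]
    else
      match PySem.List.pyGet? lst i with
      | none => none
      | some x => (order_change_bubble f (min carry x) lst (i + 1) numVal).map
          (fun r => max carry x :: r)

def order_change_alt (lst : List Int) (numVal : Int) (space : Int) (count : Int) : List Int :=
  if count = numVal then lst
  else
    match PySem.List.pyGet? lst count with
    | none => lst  -- IndexError (excluded by Pre_)
    | some c0 =>
      PySem.List.slice lst none (some count)
        ++ (order_change_bubble ((numVal - count).natAbs + 1) c0 lst (count + 1) numVal).getD []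
        ++ PySem.List.slice lst (some (numVal + 1)) none

-- ===== PRECONDITION & SPEC =====
-- Pre_ excludes inputs where A raises IndexError (count > numVal, or numVal beyond the
-- list) and negative count with count ≠ numVal, where A's returned value is an accident
-- of Python's negative-index wraparound that neither implementation would specify.
def Pre_order_change (lst : List Int) (numVal : Int) (space : Int) (count : Int) : Prop :=
  count = numVal ∨ (0 ≤ count ∧ count ≤ numVal ∧ numVal < (lst.length : Int))
instance (lst : List Int) (numVal : Int) (space : Int) (count : Int) : Decidable (Pre_order_change lst numVal space count) := by unfold Pre_order_change; infer_instance

def pvWitness_order_change : List Int × Int × Int × Int := ([3, 1, 2], 2, 0, 0)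

def Spec_order_change (lst : List Int) (numVal : Int) (space : Int) (count : Int) (out : List Int) : Prop := out = order_change_alt lst numVal space count
instance (lst : List Int) (numVal : Int) (space : Int) (count : Int) (out : List Int) : Decidable (Spec_order_change lst numVal space count out) := by unfold Spec_order_change; infer_instance

-- ===== CLAIM (what is proved, stated in full; the proofs are below) =====
def Claim_equal_order_change : Prop := ∀ (lst : List Int) (numVal : Int) (space : Int) (count : Int), Dom_order_change lst numVal space count → Pre_order_change lst numVal space count → Spec_order_change lst numVal space count (order_change lst numVal space count)

-- ===== LEMMAS AND PROOFS =====

-- the value of a bubble pass: carry the running minimum, emit max(carry, x)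
def pvPass (c : Int) : List Int → List Int
  | [] => [c]
  | x :: xs => max c x :: pvPass (min c x) xs

theorem pvBubbleEq (d : Nat) : ∀ (carry : Int) (lst : List Int) (j : Nat) (fuel : Nat),
    j + d ≤ lst.length → d + 1 ≤ fuel →
    order_change_bubble fuel carry lst (j : Int) ((j : Int) + d - 1)
      = some (pvPass carry ((lst.drop j).take d)) := by
  induction d with
  | zero =>
    intro carry lst j fuel hlen hfuel
    match fuel, hfuel with
    | f + 1, _ =>
      simp [order_change_bubble, pvPass]
  | succ d ih =>
    intro carry lst j fuel hlen hfuel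
    match fuel, hfuel with
    | f + 1, hfuel =>
      have hj : j < lst.length := by omega
      have hne : ¬ ((j : Int) = (j : Int) + (d + 1 : Nat) - 1 + 1) := by push_cast; omega
      rw [order_change_bubble, if_neg hne]
      have g : PySem.List.pyGet? lst (j : Int) = some lst[j] := by
        rw [PySem.List.pyGet?_natCast, List.getElem?_eq_getElem hj]
      simp only [g]
      have hcast : (j : Int) + (d + 1 : Nat) - 1 = ((j + 1 : Nat) : Int) + (d : Nat) - 1 := by
        push_cast; ring
      have hcast1 : (j : Int) + 1 = ((j + 1 : Nat) : Int) := by push_cast; ring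
      rw [hcast, hcast1, ih (min carry lst[j]) lst (j + 1) f (by omega) (by omega)]
      have hseg : (lst.drop j).take (d + 1) = lst[j] :: (lst.drop (j + 1)).take d := by
        rw [← List.getElem_cons_drop hj]
        rfl
      rw [hseg]
      simp [pvPass]

theorem pvGoEq (d : Nat) : ∀ (lst : List Int) (c : Nat) (sp : Int) (fuel : Nat),
    c + d < lst.length → d + 1 ≤ fuel →
    order_change_go fuel lst ((c : Int) + d) sp (c : Int)
      = some (lst.take c ++ pvPass (lst.getD c 0) ((lst.drop (c + 1)).take d) ++ lst.drop (c + 1 + d)) := by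
  induction d with
  | zero =>
    intro lst c sp fuel hlen hfuel
    match fuel, hfuel with
    | f + 1, _ =>
      have hc : c < lst.length := by omega
      have key : lst.take c ++ pvPass (lst.getD c 0) [] ++ lst.drop (c + 1) = lst := by
        rw [pvPass, List.getD_eq_getElem _ _ hc, List.append_assoc, List.singleton_append,
          List.getElem_cons_drop, List.take_append_drop]
      simp only [order_change_go, Nat.cast_zero, add_zero, List.take_zero]
      rw [if_pos trivial, key]
  | succ d ih =>
    intro lst c sp fuel hlen hfuel
    match fuel, hfuel with
    | f + 1, hfuel =>
      have hc : c < lst.length := by omega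
      have hc1 : c + 1 < lst.length := by omega
      have hne : ¬ ((c : Int) = (c : Int) + (d + 1 : Nat)) := by push_cast; omega
      simp only [order_change_go, if_neg hne]
      have g1 : PySem.List.pyGet? lst (c : Int) = some lst[c] := by
        simp [PySem.List.pyGet?_natCast, List.getElem?_eq_getElem hc]
      have g2 : PySem.List.pyGet? lst ((c : Int) + 1) = some lst[c + 1] := by
        have h' : (c : Int) + 1 = ((c + 1 : Nat) : Int) := by push_cast; ring
        rw [h', PySem.List.pyGet?_natCast, List.getElem?_eq_getElem hc1]
      have hcast : (c : Int) + (d + 1 : Nat) = ((c + 1 : Nat) : Int) + (d : Nat) := by push_cast; ring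
      have hcast1 : (c : Int) + 1 = ((c + 1 : Nat) : Int) := by push_cast; ring
      have hseg : (lst.drop (c + 1)).take (d + 1)
          = lst[c + 1] :: (lst.drop (c + 1 + 1)).take d := by
        rw [← List.getElem_cons_drop hc1]
        rfl
      by_cases hlt : lst[c] < lst[c + 1]
      · simp only [g1, g2, if_pos hlt]
        have i1 : PySem.List.pySetD lst ((c : Nat) : Int) lst[c + 1] = lst.set c lst[c + 1] := by
          simp
        have i2 : PySem.List.pySetD (lst.set c lst[c + 1]) ((c : Int) + 1) lst[c]
            = (lst.set c lst[c + 1]).set (c + 1) lst[c] := by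
          rw [hcast1, PySem.List.pySetD_natCast]
        rw [i1, i2]
        set lst' := (lst.set c lst[c + 1]).set (c + 1) lst[c] with hlst'
        have hlen' : (c + 1) + d < lst'.length := by simp [hlst']; omega
        rw [hcast, hcast1, ih lst' (c + 1) lst[c] f hlen' (by omega)]
        have t1 : lst'.take (c + 1) = lst.take c ++ [lst[c + 1]] := by
          apply List.ext_getElem
          · simp [hlst']; omega
          · intro i h1 h2
            have hi1 : i < c + 1 := by simp [hlst'] at h1; omega
            simp only [hlst', List.getElem_take, List.getElem_set]
            rcases Nat.lt_or_ge i c with hic | hic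
            · rw [if_neg (by omega : ¬ c + 1 = i), if_neg (by omega : ¬ c = i)]
              rw [List.getElem_append_left (by simp; omega), List.getElem_take]
            · have hie : i = c := by omega
              subst hie
              rw [if_neg (by omega : ¬ i + 1 = i), if_pos rfl]
              rw [List.getElem_append_right (by simp)]
              simp
        have t2 : lst'.getD (c + 1) 0 = lst[c] := by
          rw [List.getD_eq_getElem _ _ (by simp [hlst']; omega)]
          simp [hlst']
        have t3 : lst'.drop (c + 1 + 1) = lst.drop (c + 1 + 1) := by
          apply List.ext_getElem
          · simp [hlst']
          · intro i h1 h2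
            simp only [hlst', List.getElem_drop, List.getElem_set]
            split_ifs with e1 e2
            · exact absurd e1 (by omega)
            · exact absurd e2 (by omega)
            · rfl
        have t4 : lst'.drop (c + 1 + 1 + d) = lst.drop (c + 1 + (d + 1)) := by
          apply List.ext_getElem
          · simp [hlst']; omega
          · intro i h1 h2
            simp only [hlst', List.getElem_drop, List.getElem_set]
            split_ifs with e1 e2
            · exact absurd e1 (by omega)
            · exact absurd e2 (by omega)
            · congr 1
              omega
        rw [t1, t2, t3, t4, hseg]
        have hmax : max (lst.getD c 0) lst[c + 1] = lst[c + 1] := by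
          rw [List.getD_eq_getElem _ _ hc]; omega
        have hmin : min (lst.getD c 0) lst[c + 1] = lst[c] := by
          rw [List.getD_eq_getElem _ _ hc]; omega
        simp only [pvPass]
        rw [hmax, hmin]
        simp only [List.append_assoc, List.cons_append, List.nil_append]
      · simp only [g1, g2, if_neg hlt]
        rw [hcast, hcast1, ih lst (c + 1) sp f (by omega) (by omega)]
        have htake : lst.take (c + 1) = lst.take c ++ [lst[c]] := by
          rw [List.take_add_one, List.getElem?_eq_getElem hc]
          rfl
        have hmax : max (lst.getD c 0) lst[c + 1] = lst[c] := by
          rw [List.getD_eq_getElem _ _ hc]; omega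
        have hmin : min (lst.getD c 0) lst[c + 1] = lst[c + 1] := by
          rw [List.getD_eq_getElem _ _ hc]; omega
        have hgd : lst.getD (c + 1) 0 = lst[c + 1] := List.getD_eq_getElem _ _ hc1
        have hd : c + 1 + 1 + d = c + 1 + (d + 1) := by omega
        rw [hseg, htake, hgd, hd]
        simp only [pvPass]
        rw [hmax, hmin]
        simp only [List.append_assoc, List.cons_append, List.nil_append]

theorem pvAltEq (lst : List Int) (c d : Nat) (sp : Int) (hd : 0 < d) (hlen : c + d < lst.length) :
    order_change_alt lst ((c : Int) + d) sp (c : Int)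
      = lst.take c ++ pvPass (lst.getD c 0) ((lst.drop (c + 1)).take d) ++ lst.drop (c + 1 + d) := by
  have hne : ¬ ((c : Int) = (c : Int) + (d : Nat)) := by omega
  have hc : c < lst.length := by omega
  rw [order_change_alt, if_neg hne]
  have g : PySem.List.pyGet? lst (c : Int) = some lst[c] := by
    rw [PySem.List.pyGet?_natCast, List.getElem?_eq_getElem hc]
  simp only [g]
  have e1 : PySem.List.slice lst none (some (c : Int)) = lst.take c :=
    PySem.List.slice_to_natCast ..
  have e2 : (c : Int) + (d : Nat) + 1 = ((c + 1 + d : Nat) : Int) := by push_cast; ring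
  have efuel : ((c : Int) + d - c).natAbs + 1 = d + 1 := by
    congr 1; omega
  have ecast1 : (c : Int) + 1 = ((c + 1 : Nat) : Int) := by push_cast; ring
  have ecast2 : (c : Int) + (d : Nat) = ((c + 1 : Nat) : Int) + (d : Nat) - 1 := by push_cast; ring
  rw [e1, e2, PySem.List.slice_from_natCast, efuel, ecast1, ecast2,
    pvBubbleEq d lst[c] lst (c + 1) (d + 1) (by omega) le_rfl, Option.getD_some,
    List.getD_eq_getElem _ _ hc]

-- ===== VERDICT (by name: the statement is the Claim_ definition above) =====
theorem order_change_spec : Claim_equal_order_change := by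
  intro lst numVal space count _ hpre
  unfold Spec_order_change
  by_cases heq : count = numVal
  · subst heq
    simp [order_change, order_change_go, order_change_alt]
  · rcases hpre with h | ⟨h0, hcn, hlen⟩
    · exact absurd h heq
    · obtain ⟨c, rfl⟩ : ∃ c : Nat, count = (c : Int) := ⟨count.toNat, (Int.toNat_of_nonneg h0).symm⟩
      obtain ⟨d, hd⟩ : ∃ d : Nat, numVal = (c : Int) + d :=
        ⟨(numVal - c).toNat, by omega⟩
      subst hd
      have hdpos : 0 < d := by
        by_contra hdz
        have hd0 : d = 0 := by omega
        subst hd0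
        exact heq (by simp)
      have hlen' : c + d < lst.length := by omega
      have hfuel : ((c : Int) + d - c).natAbs + 1 = d + 1 := by
        congr 1; omega
      rw [order_change, hfuel, pvGoEq d lst c space (d + 1) hlen' le_rfl,
        Option.getD_some, pvAltEq lst c d space hdpos hlen']
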